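-- pv_equiv track=rewrite | github.com/EvanGC/UdemyDataPipeline | ingestion.py | sanitize_table_name
-- ===== SOURCE A (Python) =====
-- def sanitize_table_name(filename_without_ext: str) -> str:
--     """
--     Convierte un nombre de archivo en un nombre de tabla SQL seguro y normalizado.
--     Ej: "Mi Archivo-123.csv" -> "mi_archivo_123"
--     """
--     # Convertir a minúsculas
--     name = filename_without_ext.lower()
--     # Reemplazar caracteres no alfanuméricos (excepto guion bajo) por guion bajo
--     name = ''.join(c if c.isalnum() else '_' for c in name)
--     # Eliminar guiones bajos duplicados
--     name = '_'.join(filter(None, name.split('_')))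
--     # Asegurar que no empiece con un número
--     # dlt se encarga de citar si es necesario, así que esto es más por convención.
--     if name and name[0].isdigit():
--         name = f"_{name}"
--     if not name: # Si el nombre queda vacío
--         raise ValueError(f"No se pudo generar un nombre de tabla válido de '{filename_without_ext}'")
--     return name
-- ===== SOURCE B (Python) =====
-- def sanitize_table_name(filename_without_ext: str) -> str:
--     out = []
--     pending = False  # a separator is waiting to be emitted
--     for c in filename_without_ext.lower():
--         if c.isalnum():
--             if pending and out:
--                 out.append('_')
--             out.append(c)
--             pending = False
--         else:
--             pending = True
--     if not out:
--         raise ValueError(f"No se pudo generar un nombre de tabla válido de '{filename_without_ext}'")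
--     if out[0].isdigit():
--         out.insert(0, '_')
--     return ''.join(out)
-- ===== Notes on version B (the rewrite author's own statement) =====
-- stated objective: alternative
-- what changed: Replaces A's multi-pass pipeline (map every non-alphanumeric char to '_', then split on '_', filter empties, rejoin) by a single stateful left-to-right pass that emits characters directly, inserting one '_' between runs via a pending-separator flag.
import Mathlib
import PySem

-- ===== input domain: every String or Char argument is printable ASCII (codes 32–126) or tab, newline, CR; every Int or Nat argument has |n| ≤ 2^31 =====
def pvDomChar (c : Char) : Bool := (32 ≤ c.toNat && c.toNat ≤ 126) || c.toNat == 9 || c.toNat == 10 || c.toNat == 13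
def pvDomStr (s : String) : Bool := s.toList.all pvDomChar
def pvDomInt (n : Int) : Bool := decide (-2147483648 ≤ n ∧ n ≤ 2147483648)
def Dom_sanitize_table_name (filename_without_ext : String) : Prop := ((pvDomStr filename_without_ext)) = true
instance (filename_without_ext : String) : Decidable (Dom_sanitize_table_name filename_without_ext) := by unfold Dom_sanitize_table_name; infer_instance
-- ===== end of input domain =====

-- B replaces A's map + split('_') / filter / join multi-pass by a single stateful pass with a
-- pending-separator flag (objective: alternative decomposition, same asymptotic cost).
-- On inputs with no alphanumeric character the Python A raises ValueError; those are outside Pre_.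

-- ===== PORT A =====
def sanitize_table_name (filename_without_ext : String) : String :=
  -- name = filename_without_ext.lower()
  let name : List Char := PySem.Chars.lower filename_without_ext.toList
  -- name = ''.join(c if c.isalnum() else '_' for c in name)
  let name : List Char := name.map (fun c => if PySem.Chars.isalnum c then c else '_')
  -- name = '_'.join(filter(None, name.split('_')))
  let name : List Char :=
    PySem.Chars.join ['_'] ((PySem.Chars.splitOn name ['_']).filter (fun p => !p.isEmpty))
  -- if name and name[0].isdigit(): name = f"_{name}"
  let name : List Char :=
    if !name.isEmpty && PySem.Chars.isdigit (name.headD ' ') then '_' :: name else name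
  -- if not name: raise ValueError(...)   -- excluded by Pre_; the port returns "" there
  String.mk name

-- ===== PORT B =====
-- one step of B's loop; state = (out, pending)
def pvAltStep (st : List Char × Bool) (c : Char) : List Char × Bool :=
  if PySem.Chars.isalnum c then
    ((if st.2 && !st.1.isEmpty then st.1 ++ ['_'] else st.1) ++ [c], false)
  else
    (st.1, true)

def sanitize_table_name_alt (filename_without_ext : String) : String :=
  let out : List Char :=
    ((PySem.Chars.lower filename_without_ext.toList).foldl pvAltStep ([], false)).1
  -- if not out: raise ValueError(...)   -- excluded by Pre_; the port returns "" there
  if out.isEmpty then String.mk []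
  else if PySem.Chars.isdigit (out.headD ' ') then String.mk ('_' :: out)
  else String.mk out

-- ===== PRECONDITION & SPEC =====
-- Pre_ excludes exactly the inputs with no alphanumeric character, on which the Python A
-- (and B alike) raises ValueError.
def Pre_sanitize_table_name (filename_without_ext : String) : Prop :=
  (PySem.Chars.lower filename_without_ext.toList).any PySem.Chars.isalnum = true
instance (filename_without_ext : String) : Decidable (Pre_sanitize_table_name filename_without_ext) := by
  unfold Pre_sanitize_table_name; infer_instance

def pvWitness_sanitize_table_name : String := "Mi Archivo-123"

def Spec_sanitize_table_name (filename_without_ext : String) (out : String) : Prop :=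
  out = sanitize_table_name_alt filename_without_ext
instance (filename_without_ext : String) (out : String) : Decidable (Spec_sanitize_table_name filename_without_ext out) := by
  unfold Spec_sanitize_table_name; infer_instance

-- ===== CLAIM (what is proved, stated in full; the proofs are below) =====
def Claim_equal_sanitize_table_name : Prop := ∀ (filename_without_ext : String), Dom_sanitize_table_name filename_without_ext → Pre_sanitize_table_name filename_without_ext → Spec_sanitize_table_name filename_without_ext (sanitize_table_name filename_without_ext)

-- ===== LEMMAS AND PROOFS =====

-- the semantic middle ground: the maximal alphanumeric runs of a list, with `cur` the run in progress
def pvRunsAux (cur : List Char) : List Char → List (List Char)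
  | [] => if cur.isEmpty then [] else [cur]
  | c :: t =>
      if PySem.Chars.isalnum c then pvRunsAux (cur ++ [c]) t
      else (if cur.isEmpty then [] else [cur]) ++ pvRunsAux [] t

theorem pvRunsAux_cons_pos {c : Char} (h : PySem.Chars.isalnum c = true) (cur t) :
    pvRunsAux cur (c :: t) = pvRunsAux (cur ++ [c]) t := by
  simp [pvRunsAux, h]

theorem pvRunsAux_cons_neg {c : Char} (h : PySem.Chars.isalnum c = false) (cur t) :
    pvRunsAux cur (c :: t) = (if cur.isEmpty then [] else [cur]) ++ pvRunsAux [] t := by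
  simp [pvRunsAux, h]

-- structural recursion equivalent of split('_') (single-char separator)
def pvSplitU (cur : List Char) : List Char → List (List Char)
  | [] => [cur]
  | c :: t => if c = '_' then cur :: pvSplitU [] t else pvSplitU (cur ++ [c]) t

theorem pvSplitOn_go_eq (fuel : Nat) (l cur : List Char) (acc : List (List Char))
    (h : l.length < fuel) :
    PySem.Chars.splitOn.go ['_'] fuel l cur acc = acc.reverse ++ pvSplitU cur.reverse l := by
  induction fuel generalizing l cur acc with
  | zero => omega
  | succ fuel ih =>
    cases l with
    | nil => simp [PySem.Chars.splitOn.go, pvSplitU]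
    | cons c rest =>
      by_cases hc : c = '_'
      · subst hc
        simp only [PySem.Chars.splitOn.go, List.isPrefixOf, BEq.rfl, Bool.true_and,
          List.isPrefixOf_nil_left, if_pos]
        rw [show List.drop (['_'].length) ('_' :: rest) = rest from rfl]
        rw [ih rest [] _ (by simpa using Nat.lt_of_succ_lt_succ h)]
        simp [pvSplitU]
      · have hpre : ¬ (['_'].isPrefixOf (c :: rest) = true) := by
          simp [List.isPrefixOf]; exact fun h' => hc h'.symm
        simp only [PySem.Chars.splitOn.go, if_neg hpre]
        rw [ih rest (c :: cur) acc (by simpa using Nat.lt_of_succ_lt_succ h)]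
        simp [pvSplitU, hc]

theorem pvSplitOn_eq (l : List Char) :
    PySem.Chars.splitOn l ['_'] = pvSplitU [] l := by
  have := pvSplitOn_go_eq (l.length + 1) l [] [] (by omega)
  simpa [PySem.Chars.splitOn] using this

theorem pvAlnum_ne_underscore {c : Char} (h : PySem.Chars.isalnum c = true) : c ≠ '_' := by
  intro h'; subst h'
  have : PySem.Chars.isalnum '_' = false := by decide
  simp [this] at h

-- A's filter(None, split('_')) over the mapped list computes exactly the alphanumeric runs
theorem pvFilter_splitU (l cur : List Char) :
    (pvSplitU cur (l.map (fun c => if PySem.Chars.isalnum c then c else '_'))).filter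
        (fun p => !p.isEmpty)
      = pvRunsAux cur l := by
  induction l generalizing cur with
  | nil =>
    simp only [List.map_nil, pvSplitU, pvRunsAux, List.filter]
    cases cur <;> simp
  | cons c t ih =>
    by_cases hc : PySem.Chars.isalnum c
    · have hne := pvAlnum_ne_underscore hc
      rw [pvRunsAux_cons_pos hc]
      simp only [List.map_cons, pvSplitU, if_pos hc, if_neg hne]
      exact ih (cur ++ [c])
    · rw [pvRunsAux_cons_neg (by simpa using hc)]
      simp only [List.map_cons, pvSplitU, if_neg hc, if_pos rfl, if_true, List.filter_cons]
      rw [ih []]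
      cases cur <;> simp

def pvHeadSep : List Char → Bool
  | [] => false
  | c :: _ => !PySem.Chars.isalnum c

theorem pvHeadSep_nil : pvHeadSep [] = false := rfl
theorem pvHeadSep_cons (c : Char) (t : List Char) :
    pvHeadSep (c :: t) = !PySem.Chars.isalnum c := rfl

theorem pvRunsAux_ne_nil (t : List Char) (cur : List Char) (h : ¬ cur.isEmpty = true) :
    pvRunsAux cur t ≠ [] := by
  induction t generalizing cur with
  | nil => simp [pvRunsAux, h]
  | cons a t ih =>
    by_cases ha : PySem.Chars.isalnum a
    · rw [pvRunsAux_cons_pos ha]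
      exact ih (cur ++ [a]) (by cases cur <;> simp)
    · rw [pvRunsAux_cons_neg (by simpa using ha)]
      simp [h]

-- join of the runs with the run in progress `cur` at the front
theorem pvJoin_runsAux (t : List Char) (cur : List Char) (h : ¬ cur.isEmpty = true) :
    PySem.Chars.join ['_'] (pvRunsAux cur t)
      = cur ++ (if pvRunsAux [] t ≠ [] ∧ pvHeadSep t = true then ['_'] else [])
            ++ PySem.Chars.join ['_'] (pvRunsAux [] t) := by
  induction t generalizing cur with
  | nil => simp [pvRunsAux, pvHeadSep_nil, PySem.Chars.join, List.intercalate, h]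
  | cons a t ih =>
    by_cases ha : PySem.Chars.isalnum a
    · rw [pvRunsAux_cons_pos ha, pvRunsAux_cons_pos ha, ih (cur ++ [a]) (by cases cur <;> simp)]
      rw [show ([] : List Char) ++ [a] = [a] from rfl, ih [a] (by simp)]
      simp [pvHeadSep_cons, ha]
    · have ha' : PySem.Chars.isalnum a = false := by simpa using ha
      rw [pvRunsAux_cons_neg ha', pvRunsAux_cons_neg ha']
      simp only [if_neg h, List.isEmpty_nil, if_pos rfl, List.nil_append]
      rcases hrs : pvRunsAux [] t with _ | ⟨r, rs⟩
      · simp [PySem.Chars.join, List.intercalate, pvHeadSep_cons]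
      · simp only [ne_eq, reduceCtorEq, not_false_eq_true, true_and, pvHeadSep_cons, ha',
          Bool.not_false, if_pos]
        simp [PySem.Chars.join, List.intercalate]

-- the invariant of B's loop
theorem pvFold_eq (l : List Char) (acc : List Char) (pending : Bool) :
    (l.foldl pvAltStep (acc, pending)).1
      = acc ++ (if (¬ acc.isEmpty = true) ∧ pvRunsAux [] l ≠ [] ∧ (pending || pvHeadSep l) = true
                then ['_'] else [])
            ++ PySem.Chars.join ['_'] (pvRunsAux [] l) := by
  induction l generalizing acc pending with
  | nil => simp [pvRunsAux, pvHeadSep_nil, PySem.Chars.join, List.intercalate]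
  | cons c t ih =>
    by_cases hc : PySem.Chars.isalnum c
    · have hstep : pvAltStep (acc, pending) c
          = ((if pending && !acc.isEmpty then acc ++ ['_'] else acc) ++ [c], false) := by
        simp [pvAltStep, hc]
      have hii := ih ((if pending && !acc.isEmpty then acc ++ ['_'] else acc) ++ [c]) false
      have hne : pvRunsAux [c] t ≠ [] := pvRunsAux_ne_nil t [c] (by simp)
      have hrne : pvRunsAux [] (c :: t) ≠ [] := by
        rw [pvRunsAux_cons_pos hc]; simpa using hne
      have hj := pvJoin_runsAux t [c] (by simp)
      rw [List.foldl_cons, hstep, hii]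
      rw [pvRunsAux_cons_pos hc, show ([] : List Char) ++ [c] = [c] from rfl, hj,
        pvHeadSep_cons, hc]
      have hacc'ne : ¬ ((if pending && !acc.isEmpty then acc ++ ['_'] else acc) ++ [c]).isEmpty = true := by
        simp
      by_cases hp : pending <;> by_cases hae : acc.isEmpty <;>
        simp only [hp, hae, hacc'ne, hne, hrne, Bool.not_true, Bool.not_false, Bool.and_true,
          Bool.and_false, Bool.true_and, Bool.false_and, Bool.false_or, Bool.true_or,
          Bool.and_self, not_true, not_false_eq_true, ne_eq, true_and, false_and, if_true,
          if_false, ite_true, ite_false] <;>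
        by_cases h2 : pvRunsAux [] t ≠ [] ∧ pvHeadSep t = true <;>
        simp [h2, hae]
    · have hc' : PySem.Chars.isalnum c = false := by simpa using hc
      have hstep : pvAltStep (acc, pending) c = (acc, true) := by simp [pvAltStep, hc']
      rw [List.foldl_cons, hstep, ih acc true, pvRunsAux_cons_neg hc']
      simp [pvHeadSep_cons, hc']

-- the two cores coincide on every input list
theorem pvCore_eq (l : List Char) :
    PySem.Chars.join ['_']
        ((PySem.Chars.splitOn (l.map (fun c => if PySem.Chars.isalnum c then c else '_')) ['_']).filter
          (fun p => !p.isEmpty))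
      = (l.foldl pvAltStep ([], false)).1 := by
  rw [pvSplitOn_eq, pvFilter_splitU, pvFold_eq]
  simp

-- the common digit-prefix / empty postprocessing, phrased once over the shared core
theorem pvPost_eq (core : List Char) :
    String.mk (if !core.isEmpty && PySem.Chars.isdigit (core.headD ' ') then '_' :: core else core)
      = (if core.isEmpty then String.mk []
         else if PySem.Chars.isdigit (core.headD ' ') then String.mk ('_' :: core)
         else String.mk core) := by
  cases core with
  | nil => simp
  | cons c t => by_cases hd : PySem.Chars.isdigit c <;> simp [hd]

-- ===== VERDICT (by name: the statement is the Claim_ definition above) =====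
theorem sanitize_table_name_spec : Claim_equal_sanitize_table_name := by
  intro s _ _
  unfold Spec_sanitize_table_name sanitize_table_name sanitize_table_name_alt
  rw [← pvCore_eq]
  exact (pvPost_eq _).symm ▸ rfl
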